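-- pv_equiv track=rewrite | github.com/ewdhp/molecular_physics | electronic_configurations.py | build_electron_configuration
-- ===== SOURCE A (Python) =====
-- ORBITAL_ORDER = [
--     '1s', '2s', '2p', '3s', '3p', '4s', '3d', '4p', '5s', '4d', '5p', '6s',
--     '4f', '5d', '6p', '7s', '5f', '6d', '7p'
-- ]
--
-- MAX_ELECTRONS = {
--     's': 2, 'p': 6, 'd': 10, 'f': 14
-- }
--
-- def get_orbital_type(orbital_str):
--     """Extract orbital type (s, p, d, f) from orbital string like '3d'."""
--     return orbital_str[-1]
--
-- def build_electron_configuration(Z):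
--     """
--     Build ground state electron configuration for element with atomic number Z.
--
--     Parameters:
--     -----------
--     Z : int
--         Atomic number (number of electrons)
--
--     Returns:
--     --------
--     config : dict
--         Dictionary mapping orbital names to electron counts
--     """
--     config = {}
--     electrons_remaining = Z
--
--     for orbital in ORBITAL_ORDER:
--         if electrons_remaining <= 0:
--             break
--
--         orbital_type = get_orbital_type(orbital)
--         max_e = MAX_ELECTRONS[orbital_type]
--
--         # Fill orbital with min(electrons_remaining, max_capacity)
--         electrons_in_orbital = min(electrons_remaining, max_e)
--         config[orbital] = electrons_in_orbital
--         electrons_remaining -= electrons_in_orbital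
--
--     return config
-- ===== SOURCE B (Python) =====
-- ORBITAL_ORDER = [
--     '1s', '2s', '2p', '3s', '3p', '4s', '3d', '4p', '5s', '4d', '5p', '6s',
--     '4f', '5d', '6p', '7s', '5f', '6d', '7p'
-- ]
--
-- MAX_ELECTRONS = {
--     's': 2, 'p': 6, 'd': 10, 'f': 14
-- }
--
--
-- def build_electron_configuration(Z):
--     """Closed-form fill: each orbital's count is min(cap, Z - capacity before it);
--     no running remaining-electrons state, no break."""
--     caps = [MAX_ELECTRONS[o[-1]] for o in ORBITAL_ORDER]
--     return {o: min(c, Z - sum(caps[:i]))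
--             for i, (o, c) in enumerate(zip(ORBITAL_ORDER, caps))
--             if min(c, Z - sum(caps[:i])) > 0}
-- ===== Notes on version B (the rewrite author's own statement) =====
-- stated objective: alternative
-- what changed: Replaces A's stateful fill loop (running electrons_remaining accumulator with an early break) by a per-orbital closed form min(cap, Z - capacity_before_it) over prefix capacity sums, building the dict by a comprehension that keeps only positive counts.
import Mathlib
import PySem

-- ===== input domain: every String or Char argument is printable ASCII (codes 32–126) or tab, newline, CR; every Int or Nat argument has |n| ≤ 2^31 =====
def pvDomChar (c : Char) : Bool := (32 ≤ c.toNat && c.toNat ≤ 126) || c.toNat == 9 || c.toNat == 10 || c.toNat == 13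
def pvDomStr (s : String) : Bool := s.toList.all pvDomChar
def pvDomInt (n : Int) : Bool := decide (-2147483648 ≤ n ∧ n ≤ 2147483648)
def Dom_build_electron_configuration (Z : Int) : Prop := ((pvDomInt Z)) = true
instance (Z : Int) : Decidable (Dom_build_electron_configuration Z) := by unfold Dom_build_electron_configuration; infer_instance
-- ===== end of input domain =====

-- B replaces A's stateful fill loop (running remaining count + early break) by a per-orbital
-- closed form min(cap, Z - capacity-before-it); alternative decomposition, same result.

-- ===== PORT A =====
-- module constants shared by both Pythons
def ORBITAL_ORDER : List String :=
  ["1s", "2s", "2p", "3s", "3p", "4s", "3d", "4p", "5s", "4d", "5p", "6s",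
   "4f", "5d", "6p", "7s", "5f", "6d", "7p"]

def MAX_ELECTRONS : PySem.Dict Char Int :=
  PySem.Dict.ofList [('s', 2), ('p', 6), ('d', 10), ('f', 14)]

-- orbital_str[-1]: Python returns a 1-char string; modelled as the Char (none = IndexError, unreachable here)
def get_orbital_type (orbital_str : String) : Option Char :=
  PySem.Str.pyGet? orbital_str (-1)

-- MAX_ELECTRONS[o[-1]]; .getD 0 is unreachable on ORBITAL_ORDER (Python raises only off the fixed table)
def pvCap (o : String) : Int :=
  ((get_orbital_type o).bind (PySem.Dict.get? MAX_ELECTRONS)).getD 0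

def pvFillLoop : List String → Int → PySem.Dict String Int → PySem.Dict String Int
  | [], _, config => config
  | orbital :: rest, rem, config =>
    if rem ≤ 0 then config
    else
      let e := min rem (pvCap orbital)
      pvFillLoop rest (rem - e) (config.insert orbital e)

def build_electron_configuration (Z : Int) : List (String × Int) :=
  (pvFillLoop ORBITAL_ORDER Z PySem.Dict.empty).items

-- ===== PORT B =====
-- dict comprehension with distinct keys, built left to right by insertion
def pvCaps : List Int := ORBITAL_ORDER.map pvCap   -- caps = [MAX_ELECTRONS[o[-1]] for o in ORBITAL_ORDER]

def build_electron_configuration_alt (Z : Int) : List (String × Int) :=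
  ((PySem.List.enumerate (ORBITAL_ORDER.zip pvCaps) 0).foldl
    (fun config p =>
      if 0 < min p.2.2 (Z - (PySem.List.slice pvCaps none (some p.1)).sum) then
        config.insert p.2.1 (min p.2.2 (Z - (PySem.List.slice pvCaps none (some p.1)).sum))
      else config)
    PySem.Dict.empty).items

-- ===== PRECONDITION & SPEC =====
def Spec_build_electron_configuration (Z : Int) (out : List (String × Int)) : Prop := out = build_electron_configuration_alt Z
instance (Z : Int) (out : List (String × Int)) : Decidable (Spec_build_electron_configuration Z out) := by unfold Spec_build_electron_configuration; infer_instance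

-- ===== CLAIM (what is proved, stated in full; the proofs are below) =====
def Claim_equal_build_electron_configuration : Prop := ∀ (Z : Int), Dom_build_electron_configuration Z → Spec_build_electron_configuration Z (build_electron_configuration Z)

-- ===== LEMMAS AND PROOFS =====

-- common normal form of both results: per-orbital (name, min cap remaining), dropping non-positive counts
def pvGen : List (String × Int) → Int → List (String × Int)
  | [], _ => []
  | (o, c) :: t, r => (if 0 < min c r then [(o, min c r)] else []) ++ pvGen t (r - c)

lemma pvGen_nonpos : ∀ (l : List (String × Int)), (∀ p ∈ l, 0 ≤ p.2) → ∀ r : Int, r ≤ 0 → pvGen l r = [] := by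
  intro l
  induction l with
  | nil => intro _ r _; rfl
  | cons p t ih =>
    intro hc r hr
    obtain ⟨o, c⟩ := p
    have hc0 : (0:Int) ≤ c := hc (o, c) (by simp)
    simp only [pvGen]
    rw [if_neg (by omega), ih (fun q hq => hc q (by simp [hq])) (r - c) (by omega)]
    rfl

lemma pvFillLoop_items : ∀ (l : List String) (r : Int) (d : PySem.Dict String Int),
    (∀ o ∈ l, d.contains o = false) → l.Nodup → (∀ o ∈ l, 0 < pvCap o) →
    (pvFillLoop l r d).items = d.items ++ pvGen (l.map (fun o => (o, pvCap o))) r := by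
  intro l
  induction l with
  | nil => intro r d _ _ _; simp [pvFillLoop, pvGen]
  | cons orbital rest ih =>
    intro r d hfresh hnd hc
    have hcap : 0 < pvCap orbital := hc orbital (by simp)
    have hcap_rest : ∀ p ∈ rest.map (fun o => (o, pvCap o)), (0:Int) ≤ p.2 := by
      intro p hp
      obtain ⟨o, ho, rfl⟩ := List.mem_map.mp hp
      exact le_of_lt (hc o (by simp [ho]))
    by_cases hr : r ≤ 0
    · simp only [pvFillLoop, if_pos hr]
      rw [pvGen_nonpos _ (by
        intro p hp
        simp only [List.map_cons, List.mem_cons] at hp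
        rcases hp with rfl | hp
        · exact le_of_lt hcap
        · exact hcap_rest p hp) r hr]
      simp
    · simp only [pvFillLoop, if_neg hr]
      have hfr : d.contains orbital = false := hfresh orbital (by simp)
      have hins : (d.insert orbital (min r (pvCap orbital))).items
          = d.items ++ [(orbital, min r (pvCap orbital))] :=
        PySem.Dict.items_insert_of_not_contains d _ hfr
      rw [ih (r - min r (pvCap orbital)) (d.insert orbital (min r (pvCap orbital)))
          (by
            intro o ho
            rw [PySem.Dict.contains_insert]
            have hne : o ≠ orbital := by
              rintro rfl; exact (List.nodup_cons.mp hnd).1 ho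
            simp [hne, hfresh o (by simp [ho])])
          (List.nodup_cons.mp hnd).2
          (fun o ho => hc o (by simp [ho]))]
      rw [hins]
      simp only [List.map_cons, pvGen]
      have hmin : min (pvCap orbital) r = min r (pvCap orbital) := min_comm _ _
      rw [hmin, if_pos (by omega)]
      by_cases hcr : pvCap orbital ≤ r
      · rw [min_eq_right hcr] at *
        simp
      · have hmr : min r (pvCap orbital) = r := min_eq_left (by omega)
        rw [hmr]
        rw [pvGen_nonpos _ hcap_rest (r - r) (by omega),
            pvGen_nonpos _ hcap_rest (r - pvCap orbital) (by omega)]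
        simp

lemma pvBfilter (gcaps : List Int) (Z : Int) :
    ∀ (l : List (String × Int)) (i : Nat),
    (∀ k, (hk : k < l.length) → gcaps[i + k]? = some (l[k].2)) →
    ((PySem.List.enumerate l (i : Int)).filter
        (fun p => decide (0 < min p.2.2 (Z - (PySem.List.slice gcaps none (some p.1)).sum)))).map
      (fun p => (p.2.1, min p.2.2 (Z - (PySem.List.slice gcaps none (some p.1)).sum)))
    = pvGen l (Z - (gcaps.take i).sum) := by
  intro l
  induction l with
  | nil => intro i _; simp [PySem.List.enumerate_nil, pvGen]
  | cons p t ih =>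
    intro i hidx
    obtain ⟨o, c⟩ := p
    have hc : gcaps[i]? = some c := by
      have := hidx 0 (by simp)
      simpa using this
    have htake : gcaps.take (i + 1) = gcaps.take i ++ [c] := by
      rw [List.take_add_one, hc]; rfl
    rw [PySem.List.enumerate_cons]
    simp only [List.filter_cons]
    have hslice : PySem.List.slice gcaps none (some (i : Int)) = gcaps.take i :=
      PySem.List.slice_to_natCast gcaps i
    have hrec : ((PySem.List.enumerate t ((i : Int) + 1)).filter
          (fun p => decide (0 < min p.2.2 (Z - (PySem.List.slice gcaps none (some p.1)).sum)))).map
        (fun p => (p.2.1, min p.2.2 (Z - (PySem.List.slice gcaps none (some p.1)).sum)))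
        = pvGen t (Z - (gcaps.take (i + 1)).sum) := by
      have hcast : ((i : Int) + 1) = ((i + 1 : Nat) : Int) := by push_cast; ring
      rw [hcast]
      exact ih (i + 1) (by
        intro k hk
        have := hidx (k + 1) (by simpa using Nat.succ_lt_succ hk)
        simpa [Nat.add_assoc, Nat.add_comm 1 k] using this)
    have hsum : (gcaps.take (i + 1)).sum = (gcaps.take i).sum + c := by
      rw [htake]; simp
    simp only [pvGen]
    by_cases hpos : 0 < min c (Z - (gcaps.take i).sum)
    · rw [if_pos (by simpa [hslice] using hpos)]
      simp only [List.map_cons, hslice]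
      rw [hrec, hsum, if_pos hpos]
      simp [sub_add_eq_sub_sub]
    · rw [if_neg (by simpa [hslice] using hpos)]
      rw [hrec, hsum, if_neg hpos]
      simp [sub_add_eq_sub_sub]

-- ===== VERDICT (by name: the statement is the Claim_ definition above) =====
theorem build_electron_configuration_spec : Claim_equal_build_electron_configuration := by
  intro Z _
  show build_electron_configuration Z = build_electron_configuration_alt Z
  have hA : build_electron_configuration Z
      = pvGen (ORBITAL_ORDER.map (fun o => (o, pvCap o))) Z := by
    unfold build_electron_configuration
    rw [pvFillLoop_items ORBITAL_ORDER Z PySem.Dict.empty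
        (by intro o _; simp [PySem.Dict.contains_empty])
        (by decide) (by decide),
       show (PySem.Dict.empty : PySem.Dict String Int).items = [] from rfl,
       List.nil_append]
  have hzip : ORBITAL_ORDER.zip pvCaps
      = ORBITAL_ORDER.map (fun o => (o, pvCap o)) := by decide
  have hB : build_electron_configuration_alt Z
      = pvGen (ORBITAL_ORDER.zip pvCaps) Z := by
    unfold build_electron_configuration_alt
    rw [PySem.List.foldl_ite_eq_foldl_filter]
    have hins := PySem.Dict.items_foldl_insert_fresh
      ((PySem.List.enumerate (ORBITAL_ORDER.zip pvCaps) 0).filter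
        (fun x => decide (0 < min x.2.2 (Z - (PySem.List.slice pvCaps none (some x.1)).sum))))
      (fun p => p.2.1)
      (fun p => min p.2.2 (Z - (PySem.List.slice pvCaps none (some p.1)).sum))
      PySem.Dict.empty
      (by intro a _; simp [PySem.Dict.contains_empty])
      (by exact (List.filter_sublist.map _).nodup (by decide))
    rw [hins, show (PySem.Dict.empty : PySem.Dict String Int).items = [] from rfl,
        List.nil_append]
    simpa using pvBfilter pvCaps Z (ORBITAL_ORDER.zip pvCaps) 0 (by decide)
  rw [hA, hB, hzip]
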